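-- pv_equiv track=rewrite | github.com/WonyJeong/wony-algo | BOJ/class/3/5430.py | solution
-- ===== SOURCE A (Python) =====
-- def solution(p, n, arr):
--     s, e = 0, len(arr) - 1
--     ct = len(arr)
--     is_reversed = False
--
--     for _p in p:
--         if _p == 'R':
--             is_reversed = not is_reversed
--         else:
--             ct -= 1
--             if not is_reversed:
--                 s += 1
--             else:
--                 e -= 1
--
--             if ct < 0:
--                 return 'error'
--
--     answer_arr = arr[s:e+1] if not is_reversed else list(reversed(arr[s:e+1]))
--
--     return '[' + ','.join(str(v) for v in answer_arr) + ']'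
-- ===== SOURCE B (Python) =====
-- def solution(p, n, arr):
--     # maintain the actual collection: eager reverse + pop-front, no pointers/flag
--     dq = list(arr)
--     for c in p:
--         if c == 'R':
--             dq.reverse()
--         else:
--             if not dq:
--                 return 'error'
--             dq.pop(0)
--     return '[' + ','.join(str(v) for v in dq) + ']'
-- ===== Notes on version B (the rewrite author's own statement) =====
-- stated objective: alternative
-- what changed: B maintains the real list (eagerly reversing on 'R' and popping the front on delete, with an emptiness check before each pop) instead of A's lazy reversed-flag with two moving slice pointers and a single final slice.
import Mathlib
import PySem

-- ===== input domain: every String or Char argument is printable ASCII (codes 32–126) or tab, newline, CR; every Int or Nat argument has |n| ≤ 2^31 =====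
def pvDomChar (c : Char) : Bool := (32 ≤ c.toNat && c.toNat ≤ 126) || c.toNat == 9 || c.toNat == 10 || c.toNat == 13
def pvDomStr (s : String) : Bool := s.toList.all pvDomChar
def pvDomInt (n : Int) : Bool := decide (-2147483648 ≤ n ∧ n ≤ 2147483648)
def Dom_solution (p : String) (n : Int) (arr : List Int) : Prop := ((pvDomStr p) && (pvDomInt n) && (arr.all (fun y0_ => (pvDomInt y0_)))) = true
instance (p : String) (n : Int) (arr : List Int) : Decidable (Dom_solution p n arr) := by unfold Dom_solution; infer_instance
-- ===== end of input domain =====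

-- B maintains the real list (eager reverse on 'R', pop-front with an emptiness check on delete)
-- instead of A's lazy reversed-flag with two moving pointers and a single final slice; alternative decomposition, no speed claim.

-- shared renderer: '[' + ','.join(str(v) for v in l) + ']'
def solRender (l : List Int) : String :=
  "[" ++ PySem.Str.join "," (l.map PySem.Int.toStr) ++ "]"

-- ===== PORT A =====
-- A's loop over the command string; state (s, e, ct, is_reversed); none = early 'error' return
def solLoopA : List Char → Int → Int → Int → Bool → Option (Int × Int × Int × Bool)
  | [], s, e, ct, rev => some (s, e, ct, rev)
  | c :: cs, s, e, ct, rev =>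
    if c = 'R' then solLoopA cs s e ct (!rev)
    else
      let ct' := ct - 1
      let s' := if !rev then s + 1 else s
      let e' := if !rev then e else e - 1
      if ct' < 0 then none else solLoopA cs s' e' ct' rev

def solution (p : String) (n : Int) (arr : List Int) : String :=
  match solLoopA p.toList 0 ((arr.length : Int) - 1) (arr.length : Int) false with
  | none => "error"
  | some (s, e, _, rev) =>
      let answer_arr :=
        if !rev then PySem.List.slice arr (some s) (some (e + 1))
        else (PySem.List.slice arr (some s) (some (e + 1))).reverse
      solRender answer_arr

-- ===== PORT B =====
-- B's loop: the actual list; reverse on 'R', pop the front otherwise; none = 'error'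
def solLoopB : List Char → List Int → Option (List Int)
  | [], dq => some dq
  | c :: cs, dq =>
    if c = 'R' then solLoopB cs dq.reverse
    else
      match dq with
      | [] => none
      | _ :: rest => solLoopB cs rest

def solution_alt (p : String) (n : Int) (arr : List Int) : String :=
  match solLoopB p.toList arr with
  | none => "error"
  | some dq => solRender dq

-- ===== PRECONDITION & SPEC =====
def Spec_solution (p : String) (n : Int) (arr : List Int) (out : String) : Prop := out = solution_alt p n arr
instance (p : String) (n : Int) (arr : List Int) (out : String) : Decidable (Spec_solution p n arr out) := by unfold Spec_solution; infer_instance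

-- ===== CLAIM (what is proved, stated in full; the proofs are below) =====
def Claim_equal_solution : Prop := ∀ (p : String) (n : Int) (arr : List Int), Dom_solution p n arr → Spec_solution p n arr (solution p n arr)

-- ===== LEMMAS AND PROOFS =====

-- the list A's pointer state (s, e, rev) denotes
def solView (arr : List Int) (s e : Int) (rev : Bool) : List Int :=
  if rev then (PySem.List.slice arr (some s) (some (e + 1))).reverse
  else PySem.List.slice arr (some s) (some (e + 1))

lemma solView_eq_take_drop (arr : List Int) (s e : Int) (rev : Bool)
    (hs : 0 ≤ s) (he : 0 ≤ e + 1) :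
    solView arr s e rev =
      (if rev then ((arr.drop s.toNat).take ((e + 1).toNat - s.toNat)).reverse
       else (arr.drop s.toNat).take ((e + 1).toNat - s.toNat)) := by
  unfold solView
  rw [PySem.List.slice_toNat arr hs he]

lemma solLoopB_eq (arr : List Int) :
    ∀ (cs : List Char) (s e : Int) (rev : Bool),
      0 ≤ s → s ≤ e + 1 → e < (arr.length : Int) →
      solLoopB cs (solView arr s e rev) =
        (solLoopA cs s e (e - s + 1) rev).map (fun q => solView arr q.1 q.2.1 q.2.2.2) := by
  intro cs
  induction cs with
  | nil => intro s e rev _ _ _; simp [solLoopB, solLoopA]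
  | cons c cs ih =>
    intro s e rev hs hse he
    by_cases hc : c = 'R'
    · have hrev : (solView arr s e rev).reverse = solView arr s e (!rev) := by
        cases rev <;> simp [solView]
      simp only [solLoopB, solLoopA, hc, reduceIte]
      rw [hrev, ih s e (!rev) hs hse he]
    · by_cases hempty : s = e + 1
      · -- slice is empty; A's ct goes negative, B pops from empty: both error
        have hv : solView arr s e rev = [] := by
          rw [solView_eq_take_drop arr s e rev hs (by omega)]
          have h0 : (e + 1).toNat - s.toNat = 0 := by omega
          cases rev <;> simp [h0]
        have hneg : e - s + 1 - 1 < 0 := by omega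
        simp only [solLoopB, solLoopA, if_neg hc, hv, if_pos hneg, Option.map_none]
      · -- s ≤ e : slice nonempty
        have hsle : s ≤ e := by omega
        have hsn : s.toNat < arr.length := by omega
        have hk : (e + 1).toNat - s.toNat = ((e + 1).toNat - s.toNat - 1) + 1 := by omega
        have hct : ¬ (e - s + 1 - 1 < 0) := by omega
        cases rev with
        | false =>
          have hstep : solView arr s e false =
              arr[s.toNat] :: solView arr (s + 1) e false := by
            have h1 : (s + 1).toNat = s.toNat + 1 := by omega
            have h2 : (e + 1).toNat - (s + 1).toNat = (e + 1).toNat - s.toNat - 1 := by omega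
            rw [solView_eq_take_drop arr s e false hs (by omega),
                solView_eq_take_drop arr (s + 1) e false (by omega) (by omega)]
            simp only [Bool.false_eq_true, reduceIte]
            rw [h2, h1, List.drop_eq_getElem_cons hsn, hk, List.take_succ_cons]
            simp
          simp only [solLoopB, solLoopA, if_neg hc, hstep, Bool.not_false, reduceIte, if_neg hct]
          have harith : e - s + 1 - 1 = e - (s + 1) + 1 := by ring
          rw [harith, ih (s + 1) e false (by omega) (by omega) he]
        | true =>
          have hstep : solView arr s e true =
              arr[e.toNat] :: solView arr s (e - 1) true := by
            have he1 : e - 1 + 1 = e := by ring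
            have hidx : s.toNat + (e.toNat - s.toNat) = e.toNat := by omega
            have hlt : e.toNat < arr.length := by omega
            have h3 : (e + 1).toNat - s.toNat - 1 = e.toNat - s.toNat := by omega
            rw [solView_eq_take_drop arr s e true hs (by omega),
                solView_eq_take_drop arr s (e - 1) true hs (by omega)]
            simp only [reduceIte]
            rw [he1, hk, h3]
            rw [List.take_add_one, List.getElem?_drop, hidx, List.getElem?_eq_getElem hlt]
            simp [List.reverse_append]
          simp only [solLoopB, solLoopA, if_neg hc, hstep, Bool.not_true, Bool.false_eq_true,
            reduceIte, if_neg hct]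
          have harith : e - s + 1 - 1 = e - 1 - s + 1 := by ring
          rw [harith, ih s (e - 1) true hs (by omega) (by omega)]

lemma solView_init (arr : List Int) :
    solView arr 0 ((arr.length : Int) - 1) false = arr := by
  unfold solView
  have : ((arr.length : Int) - 1) + 1 = (arr.length : Int) := by ring
  rw [this]
  simp [PySem.List.slice_to]

-- ===== VERDICT (by name: the statement is the Claim_ definition above) =====
theorem solution_spec : Claim_equal_solution := by
  intro p n arr _
  unfold Spec_solution solution solution_alt
  have h0 : (arr.length : Int) = ((arr.length : Int) - 1) - 0 + 1 := by ring
  rw [show (solLoopB p.toList arr) = solLoopB p.toList (solView arr 0 ((arr.length : Int) - 1) false) by rw [solView_init]]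
  rw [solLoopB_eq arr p.toList 0 ((arr.length : Int) - 1) false (by omega) (by omega) (by omega), ← h0]
  cases hA : solLoopA p.toList 0 ((arr.length : Int) - 1) (arr.length : Int) false with
  | none => simp
  | some q =>
    obtain ⟨s, e, ct, rev⟩ := q
    cases rev <;> simp [solView]
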